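-- pv_equiv track=rewrite | github.com/foobar112358/foobar-13 | when_it_rains_it_pours.py | configure_matrix
-- ===== SOURCE A (Python) =====
-- def configure_matrix(heights):
--     matrix = [[None for _ in range(max(heights))] for _ in range(len(heights))]
--     maxi = max(heights)
--     for i in range(len(heights)):
--         for j in range(maxi):
--             if j < heights[i]:
--                 matrix[i][j] = 'b'  # 'b' for brick
--             else:
--                 matrix[i][j] = 'p'  # 'p' for potential
--     return matrix, maxi
-- ===== SOURCE B (Python) =====
-- def configure_matrix(heights):
--     maxi = max(heights)
--     row_for = {}
--     row = ['p'] * maxi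
--     prev = 0
--     for h in sorted(set(heights)):
--         for j in range(prev, h):
--             row[j] = 'b'
--         row_for[h] = row[:]
--         prev = h
--     return [row_for[h] for h in heights], maxi
-- ===== Notes on version B (the rewrite author's own statement) =====
-- stated objective: alternative
-- what changed: B sorts the distinct heights ascending and grows ONE working row incrementally (turning only the cells between the previous and the current height to 'b'), memoises the snapshot per distinct height in a dict, and assembles the matrix by lookup; Pre_ restricts to nonempty lists of nonnegative heights (the natural domain of column heights): on negative heights B's incremental indexing wraps or raises, and on [] max() raises in both.
-- outside the precondition, e.g. on configure_matrix([-2, 1]): A returns ([['p'], ['b']], 1), B raises IndexError; on configure_matrix([]): A raises ValueError, B raises ValueError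
import Mathlib
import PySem

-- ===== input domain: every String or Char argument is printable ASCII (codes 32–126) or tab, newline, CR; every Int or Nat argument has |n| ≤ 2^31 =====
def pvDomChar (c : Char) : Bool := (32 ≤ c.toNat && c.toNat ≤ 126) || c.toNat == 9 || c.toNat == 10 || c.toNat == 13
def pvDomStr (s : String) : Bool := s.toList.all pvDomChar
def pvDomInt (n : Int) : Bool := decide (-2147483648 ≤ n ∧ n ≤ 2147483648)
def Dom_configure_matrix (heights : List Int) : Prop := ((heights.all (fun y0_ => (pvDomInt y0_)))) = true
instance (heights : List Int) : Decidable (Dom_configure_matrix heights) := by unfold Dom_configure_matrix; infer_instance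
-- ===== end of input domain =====

-- B replaces A's per-cell nested loops by an incremental staircase: sort the distinct heights,
-- grow one working row, memoise a snapshot per distinct height, assemble the matrix by lookup.

-- ===== PORT A =====
-- matrix[i][j] = v  (i, j come from ranges, so they are nonnegative and in range; List.set/modify are exact there)
def cmSet (m : List (List (Option String))) (i j : Int) (v : String) : List (List (Option String)) :=
  m.modify i.toNat (fun row => row.set j.toNat (some v))

def configure_matrix (heights : List Int) : List (List String) × Int :=
  -- matrix = [[None for _ in range(max(heights))] for _ in range(len(heights))]; max on [] raises → Pre_
  let matrix0 : List (List (Option String)) :=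
    (PySem.List.pyRange 0 heights.length 1).map (fun _ =>
      (PySem.List.pyRange 0 ((PySem.List.max? heights (fun y => y)).getD 0) 1).map
        (fun _ => (none : Option String)))
  let maxi : Int := (PySem.List.max? heights (fun y => y)).getD 0
  let matrix :=
    (PySem.List.pyRange 0 heights.length 1).foldl (fun m i =>
      (PySem.List.pyRange 0 maxi 1).foldl (fun m' j =>
        if j < PySem.List.pyGetD heights i 0 then cmSet m' i j "b" else cmSet m' i j "p") m)
      matrix0
  -- every cell was assigned, so the Option stripping below is exact (getD's default is never used)
  (matrix.map (fun row => row.map (fun c => c.getD "")), maxi)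

-- ===== PORT B =====
def configure_matrix_alt (heights : List Int) : List (List String) × Int :=
  let maxi : Int := (PySem.List.max? heights (fun y => y)).getD 0
  -- state (row_for, row, prev); row[j] = 'b' is pySetD (exact: under Pre_ every index hit is in range);
  -- sorted(set(heights)) with the identity key is order-exact on the distinct elements
  let st := (PySem.List.sorted (PySem.Set.ofList heights) (fun y => y) false).foldl
    (fun (st : PySem.Dict Int (List String) × List String × Int) h =>
      let row := (PySem.List.pyRange st.2.2 h 1).foldl (fun r j => PySem.List.pySetD r j "b") st.2.1
      (st.1.insert h row, row, h))
    (PySem.Dict.empty, PySem.List.pyRepeat ["p"] maxi, 0)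
  -- row_for[h] never raises: every h in heights was inserted; getD's default is never used
  (heights.map (fun h => (st.1.get? h).getD []), maxi)

-- ===== PRECONDITION & SPEC =====
-- Pre_ restricts to the natural domain of column heights — a NONEMPTY list (max([]) raises ValueError
-- in both programs) of NONNEGATIVE heights: on a list containing a negative height B's incremental
-- row indexing wraps around or raises IndexError, so such lists are excluded.
def Pre_configure_matrix (heights : List Int) : Prop :=
  heights ≠ [] ∧ ∀ h ∈ heights, 0 ≤ h
instance (heights : List Int) : Decidable (Pre_configure_matrix heights) := by
  unfold Pre_configure_matrix; infer_instance
def pvWitness_configure_matrix : List Int := [2, 1]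

def Spec_configure_matrix (heights : List Int) (out : List (List String) × Int) : Prop := out = configure_matrix_alt heights
instance (heights : List Int) (out : List (List String) × Int) : Decidable (Spec_configure_matrix heights out) := by unfold Spec_configure_matrix; infer_instance

-- ===== CLAIM (what is proved, stated in full; the proofs are below) =====
def Claim_equal_configure_matrix : Prop := ∀ (heights : List Int), Dom_configure_matrix heights → Pre_configure_matrix heights → Spec_configure_matrix heights (configure_matrix heights)

-- ===== LEMMAS AND PROOFS =====

-- the canonical row for a column of height h in a matrix of width maxi
def cmCanon (maxi h : Int) : List String :=
  List.replicate h.toNat "b" ++ List.replicate (maxi - h).toNat "p"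

theorem cm_modify_id {α : Type} (m : List α) (k : Nat) : m.modify k (fun a => a) = m := by
  induction m generalizing k with
  | nil => simp
  | cons a t ih =>
      cases k with
      | zero => rfl
      | succ n => exact congrArg (a :: ·) (ih n)

theorem cm_modify_comp {α : Type} (m : List α) (k : Nat) (f g : α → α) :
    (m.modify k f).modify k g = m.modify k (fun a => g (f a)) := by
  induction m generalizing k with
  | nil => simp
  | cons a t ih =>
      cases k with
      | zero => rfl
      | succ n => exact congrArg (a :: ·) (ih n)

theorem cm_set_append_mid {α : Type} (xs : List α) (y : α) (ys : List α) (a : α) :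
    (xs ++ y :: ys).set xs.length a = xs ++ a :: ys := by
  induction xs with
  | nil => simp
  | cons x t ih => simp [ih]

theorem cm_modify_append_mid {α : Type} (xs : List α) (y : α) (ys : List α) (f : α → α) :
    (xs ++ y :: ys).modify xs.length f = xs ++ f y :: ys := by
  induction xs with
  | nil => rfl
  | cons x t ih => exact congrArg (x :: ·) ih

theorem cm_inner_eq_modify (js : List Int) (i h : Int) (m : List (List (Option String))) :
    js.foldl (fun m' j => if j < h then cmSet m' i j "b" else cmSet m' i j "p") m
      = m.modify i.toNat (fun row =>
          js.foldl (fun r j => r.set j.toNat (some (if j < h then "b" else "p"))) row) := by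
  induction js generalizing m with
  | nil => simp [cm_modify_id]
  | cons j js ih =>
      simp only [List.foldl_cons]
      have hstep : (if j < h then cmSet m i j "b" else cmSet m i j "p")
          = m.modify i.toNat (fun row => row.set j.toNat (some (if j < h then "b" else "p"))) := by
        by_cases hc : j < h <;> simp [hc, cmSet]
      rw [hstep, ih, cm_modify_comp]

theorem cm_foldl_range_set {α : Type} (g : Nat → α) :
    ∀ (n : Nat) (r : List α), n ≤ r.length →
      (List.range n).foldl (fun r' k => r'.set k (g k)) r = (List.range n).map g ++ r.drop n := by
  intro n
  induction n with
  | zero => simp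
  | succ n ih =>
      intro r hr
      rw [List.range_succ, List.foldl_append, List.map_append]
      rw [ih r (by omega)]
      have hlt : n < r.length := by omega
      rw [List.drop_eq_getElem_cons hlt]
      simp only [List.foldl_cons, List.foldl_nil]
      have hs := cm_set_append_mid (List.map g (List.range n)) r[n] (r.drop (n+1)) (g n)
      rw [List.length_map, List.length_range] at hs
      rw [hs]
      simp [List.append_assoc]

theorem cm_foldl_range_modify {α : Type} (F : Nat → α → α) (d : α) :
    ∀ (n : Nat) (m : List α), n ≤ m.length →
      (List.range n).foldl (fun m' i => m'.modify i (F i)) m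
        = (List.range n).map (fun i => F i (m.getD i d)) ++ m.drop n := by
  intro n
  induction n with
  | zero => simp
  | succ n ih =>
      intro m hm
      rw [List.range_succ, List.foldl_append, List.map_append]
      rw [ih m (by omega)]
      have hlt : n < m.length := by omega
      rw [List.drop_eq_getElem_cons hlt]
      simp only [List.foldl_cons, List.foldl_nil]
      have hs := cm_modify_append_mid (List.map (fun i => F i (m.getD i d)) (List.range n)) m[n] (m.drop (n+1)) (F n)
      rw [List.length_map, List.length_range] at hs
      rw [hs]
      simp [List.getElem?_eq_getElem hlt, List.append_assoc]

-- the stripped row A produces for a column of height h (0 ≤ h ≤ M) is the canonical row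
theorem cm_row_eq (M h : Int) (h0 : 0 ≤ h) (hle : h ≤ M) :
    (List.range M.toNat).map (fun (k : Nat) => if (k : Int) < h then "b" else "p")
      = cmCanon M h := by
  unfold cmCanon
  apply List.ext_getElem
  · simp; omega
  · intro k hk1 hk2
    rw [List.getElem_map, List.getElem_range, List.getElem_append]
    by_cases hc : k < (List.replicate h.toNat "b").length
    · rw [dif_pos hc, List.getElem_replicate]
      simp only [List.length_replicate] at hc
      have hkh : (k : Int) < h := by omega
      rw [if_pos hkh]
    · rw [dif_neg hc, List.getElem_replicate]
      simp only [List.length_replicate] at hc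
      have hkh : ¬ ((k : Int) < h) := by omega
      rw [if_neg hkh]

-- the inner j-loop on the all-None row fills it left to right
theorem cm_fill_row (mx h : Int) :
    (PySem.List.pyRange 0 mx).foldl
        (fun r j => r.set j.toNat (some (if j < h then "b" else "p")))
        ((PySem.List.pyRange 0 mx).map (fun _ => (none : Option String)))
      = (List.range mx.toNat).map (fun (k : Nat) => some (if (k : Int) < h then "b" else "p")) := by
  by_cases hmx : mx ≤ 0
  · rw [PySem.List.pyRange_one_eq_nil hmx]
    simp [Int.toNat_of_nonpos hmx]
  · have hcast : mx = ((mx.toNat : Nat) : Int) := (Int.toNat_of_nonneg (by omega)).symm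
    rw [hcast, PySem.List.pyRange_zero_nat, List.foldl_map, List.map_map]
    have := cm_foldl_range_set (fun (k : Nat) => some (if (k : Int) < h then "b" else "p"))
      mx.toNat (List.map ((fun _ => (none : Option String)) ∘ fun (k : Nat) => (k : Int)) (List.range mx.toNat))
      (by simp)
    simp only [Int.toNat_natCast] at this ⊢
    rw [this, List.drop_eq_nil_of_le (by simp), List.append_nil]

-- indexing heights by range = mapping heights
theorem cm_map_range_getD {α β : Type} (xs : List α) (d : α) (g : α → β) :
    (List.range xs.length).map (fun i => g (xs.getD i d)) = xs.map g := by
  apply List.ext_getElem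
  · simp
  · intro k hk1 hk2
    simp only [List.getElem_map, List.getElem_range] at *
    rw [List.getD_eq_getElem?_getD, List.getElem?_eq_getElem (by simpa using hk2)]
    rfl

-- A computes the canonical matrix
theorem cm_a_eq (heights : List Int) (mx : Int)
    (hmx : PySem.List.max? heights (fun y => y) = some mx)
    (hnn : ∀ h ∈ heights, 0 ≤ h) :
    configure_matrix heights = (heights.map (cmCanon mx), mx) := by
  have hmax : ∀ x ∈ heights, x ≤ mx := PySem.List.max?_isMax hmx
  unfold configure_matrix
  simp only [hmx, Option.getD_some]
  refine Prod.ext ?_ rfl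
  simp only [PySem.List.pyRange_zero_nat, List.foldl_map, List.map_map]
  simp only [cm_inner_eq_modify, Int.toNat_natCast, PySem.List.pyGetD_natCast]
  rw [cm_foldl_range_modify _ ([] : List (Option String)) heights.length _ (by simp)]
  rw [List.drop_eq_nil_of_le (by simp), List.append_nil]
  rw [List.map_congr_left (g := fun i =>
      (List.range mx.toNat).map (fun (k : Nat) => some (if (k : Int) < heights.getD i 0 then "b" else "p")))
    (by
      intro i hi
      rw [List.mem_range] at hi
      have hgetD : (List.map ((fun _ => List.map (fun _ => (none : Option String)) (PySem.List.pyRange 0 mx)) ∘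
          fun (k : Nat) => (k : Int)) (List.range heights.length)).getD i []
          = (PySem.List.pyRange 0 mx).map (fun _ => (none : Option String)) := by
        rw [List.getD_eq_getElem?_getD, List.getElem?_eq_getElem (by simpa using hi)]
        simp
      rw [hgetD, cm_fill_row])]
  simp only [List.map_map, Function.comp_def, List.map_map, Option.getD_some]
  rw [List.map_congr_left (g := fun i => cmCanon mx (heights.getD i 0))
    (by
      intro i hi
      rw [List.mem_range] at hi
      have hg : heights.getD i 0 = heights[i] := by
        rw [List.getD_eq_getElem?_getD, List.getElem?_eq_getElem hi]; rfl
      exact cm_row_eq mx (heights.getD i 0)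
        (by rw [hg]; exact hnn _ (List.getElem_mem hi))
        (by rw [hg]; exact hmax _ (List.getElem_mem hi)))]
  exact cm_map_range_getD heights 0 (cmCanon mx)

-- B-side: setting j := a .. a+n-1 to v paints a contiguous block
theorem cm_fill (v : String) :
    ∀ (n : Nat) (a : Int) (l : List String), 0 ≤ a → a.toNat + n ≤ l.length →
      (PySem.List.pyRange a (a + n) 1).foldl (fun r j => PySem.List.pySetD r j v) l
        = l.take a.toNat ++ List.replicate n v ++ l.drop (a.toNat + n) := by
  intro n
  induction n with
  | zero =>
      intro a l h0 hlen
      rw [show a + ((0 : Nat) : Int) = a by omega, PySem.List.pyRange_one_eq_nil le_rfl]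
      simp
  | succ n ih =>
      intro a l h0 hlen
      have h1 : a + ((n + 1 : Nat) : Int) = (a + n) + 1 := by push_cast; ring
      rw [h1, PySem.List.pyRange_one_succ_right (by omega), List.foldl_append]
      rw [ih a l h0 (by omega)]
      simp only [List.foldl_cons, List.foldl_nil]
      rw [PySem.List.pySetD_of_nonneg _ _ (show (0:Int) ≤ a + (n:Int) by omega)]
      have htn : (a + (n : Int)).toNat = a.toNat + n := by omega
      have hidx : a.toNat + n < l.length := by omega
      rw [htn, List.drop_eq_getElem_cons hidx]
      have hpl : (l.take a.toNat ++ List.replicate n v).length = a.toNat + n := by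
        rw [List.length_append, List.length_take, List.length_replicate]; omega
      have hs := cm_set_append_mid (l.take a.toNat ++ List.replicate n v)
        l[a.toNat + n] (l.drop (a.toNat + n + 1)) v
      rw [hpl] at hs
      rw [hs, List.replicate_succ']
      simp [List.append_assoc, Nat.add_assoc]

-- painting prev..h-1 of the canonical prev-row gives the canonical h-row
theorem cm_step (maxi prev h : Int) (h0 : 0 ≤ prev) (hph : prev ≤ h) (hhm : h ≤ maxi) :
    (PySem.List.pyRange prev h 1).foldl (fun r j => PySem.List.pySetD r j "b") (cmCanon maxi prev)
      = cmCanon maxi h := by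
  have hlen : (cmCanon maxi prev).length = maxi.toNat := by
    unfold cmCanon; rw [List.length_append, List.length_replicate, List.length_replicate]; omega
  have hfill := cm_fill "b" (h - prev).toNat prev (cmCanon maxi prev) h0 (by rw [hlen]; omega)
  rw [show prev + (((h - prev).toNat : Nat) : Int) = h by omega] at hfill
  rw [hfill]
  have htake : (cmCanon maxi prev).take prev.toNat = List.replicate prev.toNat "b" := by
    unfold cmCanon
    rw [List.take_append_of_le_length (by rw [List.length_replicate]), List.take_replicate, min_self]
  have hdrop : (cmCanon maxi prev).drop (prev.toNat + (h - prev).toNat)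
      = List.replicate (maxi - h).toNat "p" := by
    unfold cmCanon
    rw [List.drop_append, List.drop_replicate, List.drop_replicate]
    rw [show prev.toNat - (prev.toNat + (h - prev).toNat) = 0 by omega]
    simp only [List.length_replicate, List.replicate_zero, List.nil_append]
    congr 1; omega
  rw [htake, hdrop]
  unfold cmCanon
  rw [← List.replicate_add, show prev.toNat + (h - prev).toNat = h.toNat by omega]

-- the staircase loop invariant: after folding a strictly increasing list of heights in [prev, maxi],
-- the dict maps each of them to its canonical row and leaves every other key untouched
theorem cm_stair (maxi : Int) (l : List Int) :
    ∀ (d : PySem.Dict Int (List String)) (prev : Int), 0 ≤ prev →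
      (∀ x ∈ l, prev ≤ x ∧ x ≤ maxi) → l.Pairwise (· < ·) →
      ∀ x : Int,
        (x ∈ l → (l.foldl
            (fun (st : PySem.Dict Int (List String) × List String × Int) h =>
              let row := (PySem.List.pyRange st.2.2 h 1).foldl (fun r j => PySem.List.pySetD r j "b") st.2.1
              (st.1.insert h row, row, h))
            (d, cmCanon maxi prev, prev)).1.get? x = some (cmCanon maxi x)) ∧
        (x ∉ l → (l.foldl
            (fun (st : PySem.Dict Int (List String) × List String × Int) h =>
              let row := (PySem.List.pyRange st.2.2 h 1).foldl (fun r j => PySem.List.pySetD r j "b") st.2.1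
              (st.1.insert h row, row, h))
            (d, cmCanon maxi prev, prev)).1.get? x = d.get? x) := by
  induction l with
  | nil => intro d prev _ _ _ x; exact ⟨fun hx => absurd hx (List.not_mem_nil), fun _ => rfl⟩
  | cons h t ih =>
      intro d prev h0 hb hp x
      have hbh := hb h List.mem_cons_self
      have hrow : (PySem.List.pyRange prev h 1).foldl (fun r j => PySem.List.pySetD r j "b") (cmCanon maxi prev)
          = cmCanon maxi h := cm_step maxi prev h h0 hbh.1 hbh.2
      simp only [List.foldl_cons]
      rw [hrow]
      have hlt : ∀ y ∈ t, h < y := (List.pairwise_cons.mp hp).1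
      have ih' := ih (d.insert h (cmCanon maxi h)) h (le_trans h0 hbh.1)
        (fun y hy => ⟨le_of_lt (hlt y hy), (hb y (List.mem_cons_of_mem _ hy)).2⟩)
        (List.pairwise_cons.mp hp).2
      constructor
      · intro hx
        rcases List.mem_cons.mp hx with hxh | hxt
        · subst hxh
          have hnot : x ∉ t := fun hc => lt_irrefl x (hlt x hc)
          rw [(ih' x).2 hnot, PySem.Dict.get?_insert_self]
        · exact (ih' x).1 hxt
      · intro hx
        have hxh : x ≠ h := fun he => hx (he ▸ List.mem_cons_self)
        have hxt : x ∉ t := fun hc => hx (List.mem_cons_of_mem _ hc)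
        rw [(ih' x).2 hxt, PySem.Dict.get?_insert_of_ne _ _ hxh]

-- B computes the canonical matrix
theorem cm_b_eq (heights : List Int) (mx : Int)
    (hmx : PySem.List.max? heights (fun y => y) = some mx)
    (hnn : ∀ h ∈ heights, 0 ≤ h) :
    configure_matrix_alt heights = (heights.map (cmCanon mx), mx) := by
  have hmax : ∀ x ∈ heights, x ≤ mx := PySem.List.max?_isMax hmx
  have hmx0 : 0 ≤ mx := hnn mx (PySem.List.max?_mem hmx)
  unfold configure_matrix_alt
  simp only [hmx, Option.getD_some]
  refine Prod.ext ?_ rfl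
  have hinit : PySem.List.pyRepeat ["p"] mx = cmCanon mx 0 := by
    rw [PySem.List.pyRepeat_singleton]
    unfold cmCanon
    simp
  rw [hinit]
  have hstair := cm_stair mx (PySem.List.sorted (PySem.Set.ofList heights) (fun y => y) false)
    PySem.Dict.empty 0 le_rfl
    (by
      intro x hx
      rw [PySem.List.mem_sorted, PySem.Set.mem_ofList] at hx
      exact ⟨hnn x hx, hmax x hx⟩)
    (PySem.List.sorted_ofList_pairwise_lt heights)
  apply List.map_congr_left
  intro h hh
  have hmem : h ∈ PySem.List.sorted (PySem.Set.ofList heights) (fun y => y) false := by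
    rw [PySem.List.mem_sorted, PySem.Set.mem_ofList]; exact hh
  rw [(hstair h).1 hmem]
  rfl

-- ===== VERDICT (by name: the statement is the Claim_ definition above) =====
theorem configure_matrix_spec : Claim_equal_configure_matrix := by
  intro heights _ hpre
  obtain ⟨hne, hnn⟩ := hpre
  obtain ⟨mx, hmx⟩ : ∃ mx, PySem.List.max? heights (fun y => y) = some mx := by
    cases hc : PySem.List.max? heights (fun y => y) with
    | none => exact absurd ((PySem.List.max?_eq_none_iff _ _).mp hc) hne
    | some mx => exact ⟨mx, rfl⟩
  unfold Spec_configure_matrix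
  rw [cm_a_eq heights mx hmx hnn, cm_b_eq heights mx hmx hnn]
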